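-- pv_equiv track=rewrite | github.com/matusHubinsky/Cryptography | CBC_decryption.py | binaryToNumbers
-- ===== SOURCE A (Python) =====
-- def intoDecimalNumber(binary):
--     decimal = 0
--     for i in range(len(binary)):
--         if (binary[i] == '1'):
--             decimal += 2**i
--     return decimal
--
-- def binaryToNumbers(translate):
--     text = translate[::-1]
--     j = 0
--     translation = []
--     for i in range(7, len(text), 8):
--         blok = text[j:i + 1]
--         word = int(intoDecimalNumber(blok))
--         translation.append(chr(word))
--         j += 8
--     return translation
-- ===== SOURCE B (Python) =====
-- def binaryToNumbers(translate):
--     translation = []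
--     value = 0
--     for idx, ch in enumerate(reversed(translate)):
--         pos = idx % 8
--         if ch == '1':
--             value += 2 ** pos
--         if pos == 7:
--             translation.append(chr(value))
--             value = 0
--     return translation
-- ===== Notes on version B (the rewrite author's own statement) =====
-- stated objective: simpler
-- what changed: Replaced the nested block-slicing loop plus the separate intoDecimalNumber helper by one single pass over the reversed string with a running bit accumulator (pos = idx % 8), emitting a character whenever pos reaches 7.
import Mathlib
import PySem

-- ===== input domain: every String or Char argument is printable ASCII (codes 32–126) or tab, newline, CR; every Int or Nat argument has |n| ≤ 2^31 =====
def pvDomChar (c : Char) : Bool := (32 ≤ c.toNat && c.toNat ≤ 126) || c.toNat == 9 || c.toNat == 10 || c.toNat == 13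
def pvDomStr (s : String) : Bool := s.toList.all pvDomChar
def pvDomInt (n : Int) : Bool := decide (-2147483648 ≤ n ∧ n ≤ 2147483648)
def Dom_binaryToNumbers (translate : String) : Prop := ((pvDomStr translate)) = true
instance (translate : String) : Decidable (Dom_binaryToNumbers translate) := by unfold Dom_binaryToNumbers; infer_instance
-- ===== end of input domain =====

-- B re-decomposes A: one single pass over the reversed string with a running bit
-- accumulator, instead of A's block-slicing loop plus the separate intoDecimalNumber helper.

-- ===== PORT A =====
-- A's helper: little-endian sum of '1'-bits; Python's 2**i ported as 2 ^ i.toNat (i ≥ 0 here)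
def intoDecimalNumber (binary : List Char) : Int :=
  (PySem.List.pyRange 0 (binary.length : Int) 1).foldl
    (fun decimal i =>
      if PySem.List.pyGet? binary i = some '1' then decimal + 2 ^ i.toNat else decimal) 0

-- translate[::-1] is the reversed char list; chr(word) is Char.ofNat word.toNat (0 ≤ word ≤ 255)
def binaryToNumbers (translate : String) : List String :=
  let text := translate.toList.reverse
  let st := (PySem.List.pyRange 7 (text.length : Int) 8).foldl
    (fun (st : Int × List String) i =>
      let blok := PySem.List.slice text (some st.1) (some (i + 1))
      let word := intoDecimalNumber blok
      (st.1 + 8, st.2 ++ [String.ofList [Char.ofNat word.toNat]])) (0, [])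
  st.2

-- ===== PORT B =====
def binaryToNumbers_alt (translate : String) : List String :=
  ((PySem.List.enumerate translate.toList.reverse 0).foldl
    (fun (st : List String × Int) p =>
      let pos := PySem.Int.mod p.1 8
      let value := if p.2 = '1' then st.2 + 2 ^ pos.toNat else st.2
      if pos = 7 then (st.1 ++ [String.ofList [Char.ofNat value.toNat]], 0)
      else (st.1, value)) ([], 0)).1

-- ===== PRECONDITION & SPEC =====
def Spec_binaryToNumbers (translate : String) (out : List String) : Prop := out = binaryToNumbers_alt translate
instance (translate : String) (out : List String) : Decidable (Spec_binaryToNumbers translate out) := by unfold Spec_binaryToNumbers; infer_instance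

-- ===== CLAIM (what is proved, stated in full; the proofs are below) =====
def Claim_equal_binaryToNumbers : Prop := ∀ (translate : String), Dom_binaryToNumbers translate → Spec_binaryToNumbers translate (binaryToNumbers translate)

-- ===== LEMMAS AND PROOFS =====

-- one conditional bit-add, exactly the shape both ports' loop bodies produce
def pvW (c : Char) (p : Int) (v : Int) : Int := if c = '1' then v + 2 ^ p.toNat else v

def pvByteVal (c0 c1 c2 c3 c4 c5 c6 c7 : Char) : Int :=
  pvW c7 7 (pvW c6 6 (pvW c5 5 (pvW c4 4 (pvW c3 3 (pvW c2 2 (pvW c1 1 (pvW c0 0 0)))))))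

def pvChr8 (c0 c1 c2 c3 c4 c5 c6 c7 : Char) : String :=
  String.ofList [Char.ofNat (pvByteVal c0 c1 c2 c3 c4 c5 c6 c7).toNat]

-- the common characterisation both ports are reduced to
def pvChunks : List Char → List String
  | c0 :: c1 :: c2 :: c3 :: c4 :: c5 :: c6 :: c7 :: rest =>
      pvChr8 c0 c1 c2 c3 c4 c5 c6 c7 :: pvChunks rest
  | _ => []

theorem pvMod8 (s k : Int) (hs : s % 8 = 0) (h0 : 0 ≤ k) (h7 : k < 8) :
    PySem.Int.mod (s + k) 8 = k := by
  unfold PySem.Int.mod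
  rw [Int.fmod_eq_emod]
  simp
  omega

theorem pvModSelf (s : Int) (hs : s % 8 = 0) : PySem.Int.mod s 8 = 0 := by
  have := pvMod8 s 0 hs (by norm_num) (by norm_num)
  simpa using this

-- A's loop range is the first n/8 block-end indices
theorem pvRangeA (n : Nat) :
    PySem.List.pyRange 7 (n : Int) 8
      = (List.range (n / 8)).map (fun k : Nat => (7 : Int) + 8 * (k : Int)) := by
  rw [PySem.List.pyRange_of_pos _ _ (by norm_num : (0:Int) < 8)]
  have hc : (if (7:Int) < (n:Int) then (((n:Int) - 7 + 8 - 1) / 8).toNat else 0) = n / 8 := by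
    split_ifs with h <;> omega
  rw [hc]

-- A's helper on an explicit 8-char block
theorem pvInto8 (c0 c1 c2 c3 c4 c5 c6 c7 : Char) :
    intoDecimalNumber [c0, c1, c2, c3, c4, c5, c6, c7] = pvByteVal c0 c1 c2 c3 c4 c5 c6 c7 := by
  show (PySem.List.pyRange 0 ((8:Nat) : Int) 1).foldl _ 0 = _
  rw [PySem.List.pyRange_zero_natCast]
  simp [List.range_succ, pvByteVal, pvW]

def pvOutStr (t : List Char) (k : Nat) : String :=
  String.ofList [Char.ofNat (intoDecimalNumber ((t.drop (8 * k)).take 8)).toNat]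

-- A's block fold, unrolled to a map over block numbers
theorem pvAfold (t : List Char) (m : Nat) :
    ((List.range m).map (fun k : Nat => (7 : Int) + 8 * (k : Int))).foldl
      (fun (st : Int × List String) i =>
        (st.1 + 8, st.2 ++ [String.ofList [Char.ofNat
          (intoDecimalNumber (PySem.List.slice t (some st.1) (some (i + 1)))).toNat]]))
      (0, [])
    = ((8 * m : Int), (List.range m).map (pvOutStr t)) := by
  induction m with
  | zero => simp
  | succ m ih =>
    rw [List.range_succ]
    simp only [List.map_append, List.foldl_append, List.map_cons, List.map_nil,
      List.foldl_cons, List.foldl_nil]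
    rw [ih]
    refine Prod.ext (by push_cast; ring) ?_
    rw [show ((8:Int) * m) = ((8*m : Nat) : Int) by push_cast; ring]
    rw [show ((7:Int) + ((8*m : Nat) : Int) + 1) = ((8*m : Nat) : Int) + ((8:Nat) : Int) by push_cast; ring]
    rw [PySem.List.slice_natCast_add]
    simp [pvOutStr]

theorem pvChunksEq (t : List Char) :
    (List.range (t.length / 8)).map (pvOutStr t) = pvChunks t := by
  induction t using pvChunks.induct with
  | case1 c0 c1 c2 c3 c4 c5 c6 c7 rest ih =>
    have hl : (c0 :: c1 :: c2 :: c3 :: c4 :: c5 :: c6 :: c7 :: rest).length / 8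
        = rest.length / 8 + 1 := by
      simp [List.length_cons]; omega
    rw [hl, List.range_succ_eq_map, List.map_cons, List.map_map]
    rw [pvChunks]
    refine congrArg₂ List.cons ?_ ?_
    · have ht : ((c0 :: c1 :: c2 :: c3 :: c4 :: c5 :: c6 :: c7 :: rest).drop (8*0)).take 8
          = [c0, c1, c2, c3, c4, c5, c6, c7] := rfl
      rw [pvOutStr, ht, pvInto8, pvChr8]
    · rw [← ih]
      apply List.map_congr_left
      intro k _
      simp only [Function.comp_apply, pvOutStr]
      have hd : (c0 :: c1 :: c2 :: c3 :: c4 :: c5 :: c6 :: c7 :: rest).drop (8*(k+1))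
          = rest.drop (8*k) := by
        rw [show 8*(k+1) = 8 + 8*k by ring]
        exact (List.drop_drop ..).symm.trans (by norm_num)
      rw [hd]
  | case2 t h =>
    rcases t with _ | ⟨a0, _ | ⟨a1, _ | ⟨a2, _ | ⟨a3, _ | ⟨a4, _ | ⟨a5, _ | ⟨a6, _ | ⟨a7, r⟩⟩⟩⟩⟩⟩⟩⟩
    all_goals first
      | exact (h _ _ _ _ _ _ _ _ _ rfl).elim
      | simp [pvChunks]

-- one unfolded step of B's fold (definitional)
theorem pvStep (cs : List (Int × Char)) (acc : List String) (v : Int) (i : Int) (c : Char) :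
    ((i, c) :: cs).foldl
      (fun (st : List String × Int) p =>
        let pos := PySem.Int.mod p.1 8
        let value := if p.2 = '1' then st.2 + 2 ^ pos.toNat else st.2
        if pos = 7 then (st.1 ++ [String.ofList [Char.ofNat value.toNat]], 0)
        else (st.1, value)) (acc, v)
    = cs.foldl
      (fun (st : List String × Int) p =>
        let pos := PySem.Int.mod p.1 8
        let value := if p.2 = '1' then st.2 + 2 ^ pos.toNat else st.2
        if pos = 7 then (st.1 ++ [String.ofList [Char.ofNat value.toNat]], 0)
        else (st.1, value))
      (if PySem.Int.mod i 8 = 7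
       then (acc ++ [String.ofList [Char.ofNat
              (if c = '1' then v + 2 ^ (PySem.Int.mod i 8).toNat else v).toNat]], 0)
       else (acc, if c = '1' then v + 2 ^ (PySem.Int.mod i 8).toNat else v)) := by
  rfl

-- B's fold never emits while fewer than 8 - s % 8 characters remain
theorem pvBsmall (t : List Char) : ∀ (s : Int) (acc : List String) (v : Int),
    s % 8 + t.length ≤ 7 →
    ((PySem.List.enumerate t s).foldl
      (fun (st : List String × Int) p =>
        let pos := PySem.Int.mod p.1 8
        let value := if p.2 = '1' then st.2 + 2 ^ pos.toNat else st.2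
        if pos = 7 then (st.1 ++ [String.ofList [Char.ofNat value.toNat]], 0)
        else (st.1, value)) (acc, v)).1 = acc := by
  induction t with
  | nil => intro s acc v h; simp [PySem.List.enumerate]
  | cons c cs ih =>
    intro s acc v h
    have hm : PySem.Int.mod s 8 = s % 8 := by
      unfold PySem.Int.mod; rw [Int.fmod_eq_emod]; simp
    have hne : PySem.Int.mod s 8 ≠ 7 := by
      rw [hm]; simp at h; omega
    rw [PySem.List.enumerate_cons, pvStep, if_neg hne]
    exact ih (s+1) acc _ (by simp at h ⊢; omega)

-- B's fold, started at any multiple of 8, appends exactly the chunks of what remains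
theorem pvBmain (t : List Char) :
    ∀ (s : Int) (acc : List String), s % 8 = 0 →
    ((PySem.List.enumerate t s).foldl
      (fun (st : List String × Int) p =>
        let pos := PySem.Int.mod p.1 8
        let value := if p.2 = '1' then st.2 + 2 ^ pos.toNat else st.2
        if pos = 7 then (st.1 ++ [String.ofList [Char.ofNat value.toNat]], 0)
        else (st.1, value)) (acc, 0)).1 = acc ++ pvChunks t := by
  induction t using pvChunks.induct with
  | case1 c0 c1 c2 c3 c4 c5 c6 c7 rest ih =>
    intro s acc hs
    rw [PySem.List.enumerate_cons, pvStep, pvModSelf s hs, if_neg (by norm_num)]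
    rw [PySem.List.enumerate_cons, pvStep, pvMod8 s 1 hs (by norm_num) (by norm_num), if_neg (by norm_num)]
    rw [show s + 1 + 1 = s + 2 by ring]
    rw [PySem.List.enumerate_cons, pvStep, pvMod8 s 2 hs (by norm_num) (by norm_num), if_neg (by norm_num)]
    rw [show s + 2 + 1 = s + 3 by ring]
    rw [PySem.List.enumerate_cons, pvStep, pvMod8 s 3 hs (by norm_num) (by norm_num), if_neg (by norm_num)]
    rw [show s + 3 + 1 = s + 4 by ring]
    rw [PySem.List.enumerate_cons, pvStep, pvMod8 s 4 hs (by norm_num) (by norm_num), if_neg (by norm_num)]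
    rw [show s + 4 + 1 = s + 5 by ring]
    rw [PySem.List.enumerate_cons, pvStep, pvMod8 s 5 hs (by norm_num) (by norm_num), if_neg (by norm_num)]
    rw [show s + 5 + 1 = s + 6 by ring]
    rw [PySem.List.enumerate_cons, pvStep, pvMod8 s 6 hs (by norm_num) (by norm_num), if_neg (by norm_num)]
    rw [show s + 6 + 1 = s + 7 by ring]
    rw [PySem.List.enumerate_cons, pvStep, pvMod8 s 7 hs (by norm_num) (by norm_num), if_pos rfl]
    rw [show s + 7 + 1 = s + 8 by ring]
    rw [ih (s + 8) _ (by omega)]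
    simp [pvChunks, pvChr8, pvByteVal, pvW, List.append_assoc]
  | case2 t h =>
    intro s acc hs
    rcases t with _ | ⟨a0, _ | ⟨a1, _ | ⟨a2, _ | ⟨a3, _ | ⟨a4, _ | ⟨a5, _ | ⟨a6, _ | ⟨a7, r⟩⟩⟩⟩⟩⟩⟩⟩
    all_goals first
      | exact (h _ _ _ _ _ _ _ _ _ rfl).elim
      | (rw [show pvChunks _ = [] from rfl, List.append_nil]
         exact pvBsmall _ s acc 0 (by simp; omega))

-- ===== VERDICT (by name: the statement is the Claim_ definition above) =====
theorem binaryToNumbers_spec : Claim_equal_binaryToNumbers := by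
  intro translate _
  unfold Spec_binaryToNumbers binaryToNumbers binaryToNumbers_alt
  rw [pvBmain _ 0 [] (by norm_num)]
  simp only [List.nil_append]
  rw [pvRangeA, pvAfold, ← pvChunksEq]
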